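-- pv_equiv track=rewrite | github.com/AnOnYmOus001100/Python-Functions-File-and-Dictionaries | week4/course2_assessment_6.py | check_nums
-- ===== SOURCE A (Python) =====
-- def check_nums(lst):
--     ele = 0
--     sublist = []
--
--     while ele < len(lst):
--         if lst[ele] != 7:
--             sublist.append(lst[ele])
--         else:
--             return sublist
--         ele += 1
--     return sublist
-- ===== SOURCE B (Python) =====
-- def check_nums(lst):
--     # locate-then-slice: find the first 7 (or use len), then slice the prefix
--     i = lst.index(7) if 7 in lst else len(lst)
--     return lst[:i]
-- ===== Notes on version B (the rewrite author's own statement) =====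
-- stated objective: simpler
-- what changed: Replaced the index-counting while loop with element-by-element append by a two-phase locate-then-slice: find the first 7 (or len if absent) and return the slice before it; the C-level index/slice also makes it constant-factor faster.
import Mathlib
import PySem

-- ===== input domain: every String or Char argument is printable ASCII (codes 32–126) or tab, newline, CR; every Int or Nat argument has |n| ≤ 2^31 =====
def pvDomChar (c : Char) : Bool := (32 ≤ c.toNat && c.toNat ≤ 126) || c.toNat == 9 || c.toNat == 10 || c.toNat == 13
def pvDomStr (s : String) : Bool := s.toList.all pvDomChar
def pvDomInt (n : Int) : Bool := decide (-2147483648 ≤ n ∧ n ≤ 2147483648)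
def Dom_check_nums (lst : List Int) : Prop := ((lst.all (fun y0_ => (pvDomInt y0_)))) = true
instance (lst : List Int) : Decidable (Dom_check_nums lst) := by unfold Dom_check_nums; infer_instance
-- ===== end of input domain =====

-- B replaces A's while-loop with per-element append by a locate-then-slice decomposition; objective: simpler.


-- ===== PORT A =====
-- while ele < len(lst): append lst[ele] unless it is 7, in which case return sublist
def check_nums_go (sublist : List Int) (rest : List Int) : List Int :=
  match rest with
  | [] => sublist
  | x :: xs => if x ≠ 7 then check_nums_go (sublist ++ [x]) xs else sublist

def check_nums (lst : List Int) : List Int := check_nums_go [] lst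

-- ===== PORT B =====
-- i = lst.index(7) if 7 in lst else len(lst); return lst[:i]
def check_nums_alt (lst : List Int) : List Int :=
  let i : Int := if (7 : Int) ∈ lst then ((PySem.List.index? lst 7).getD 0 : Nat) else (lst.length : Nat)
  PySem.List.slice lst none (some i)

-- ===== PRECONDITION & SPEC =====
def Spec_check_nums (lst : List Int) (out : List Int) : Prop := out = check_nums_alt lst
instance (lst : List Int) (out : List Int) : Decidable (Spec_check_nums lst out) := by unfold Spec_check_nums; infer_instance

-- ===== CLAIM (what is proved, stated in full; the proofs are below) =====
def Claim_equal_check_nums : Prop := ∀ (lst : List Int), Dom_check_nums lst → Spec_check_nums lst (check_nums lst)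

-- ===== LEMMAS AND PROOFS =====
lemma check_nums_go_eq (rest sublist : List Int) :
    check_nums_go sublist rest = sublist ++ rest.takeWhile (fun x => x ≠ 7) := by
  induction rest generalizing sublist with
  | nil => simp [check_nums_go]
  | cons x xs ih =>
    simp only [check_nums_go, List.takeWhile_cons]
    by_cases h : x = 7 <;> simp [h, ih]

lemma check_nums_alt_eq (lst : List Int) :
    check_nums_alt lst = lst.takeWhile (fun x => x ≠ 7) := by
  induction lst with
  | nil => simp [check_nums_alt, PySem.List.slice]
  | cons x xs ih =>
    by_cases hx : x = 7
    · subst hx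
      simp [check_nums_alt, PySem.List.slice]
    · by_cases hm : (7 : Int) ∈ xs
      · obtain ⟨k, hk⟩ := Option.isSome_iff_exists.mp
          ((PySem.List.index?_isSome_iff (xs := xs) (v := 7)).mpr hm)
        have h7 : (7 : Int) ∈ x :: xs := List.mem_cons_of_mem _ hm
        have hidx : PySem.List.index? (x :: xs) 7 = some (k + 1) := by
          rw [PySem.List.index?_cons_of_ne (x := x) (v := 7) (xs := xs) hx, hk]; rfl
        have hk' : List.idxOf? 7 xs = some k := by
          simpa [PySem.List.index?_eq_idxOf?] using hk
        have ihk : xs.take k = List.takeWhile (fun x => decide (x ≠ 7)) xs := by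
          simpa [check_nums_alt, hm, hk', PySem.List.slice_to_natCast] using ih
        simp only [check_nums_alt, h7, if_true, hidx, Option.getD_some,
          PySem.List.slice_to_natCast]
        simp [hx, ihk]
      · have hm' : (7 : Int) ∉ x :: xs := by
          intro h
          rcases List.mem_cons.mp h with h | h
          · exact hx h.symm
          · exact hm h
        have ihl : PySem.List.slice xs none (some (xs.length : Nat)) =
            List.takeWhile (fun x => decide (x ≠ 7)) xs := by
          simpa [check_nums_alt, hm] using ih
        simp only [check_nums_alt, hm', if_false, PySem.List.slice_to_natCast] at *
        simp [hx, ihl]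

-- ===== VERDICT (by name: the statement is the Claim_ definition above) =====
theorem check_nums_spec : Claim_equal_check_nums := by
  intro lst _
  unfold Spec_check_nums check_nums
  rw [check_nums_go_eq, check_nums_alt_eq]
  simp
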